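-- pv_equiv track=rewrite | github.com/trungnguyencs/Leetcode | 0305-number-of-islands-ii/0305-number-of-islands-ii.py | numIslands2
-- ===== SOURCE A (Python) =====
-- from typing import List
--
-- def numIslands2(m: int, n: int, positions: List[List[int]]) -> List[int]:
--     ans = []
--     union = UnionFind()
--     for r, c in positions:
--         if (r, c) in union.id:
--             ans.append(union.componentCount)
--             continue
--         union.add((r, c))
--         neighs = [(r - 1, c), (r + 1, c), (r, c - 1), (r, c + 1)]
--         for nr, nc in neighs:
--             if (nr, nc) in union.id:
--                 union.union((nr, nc), (r, c))
--         ans.append(union.componentCount)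
--     return ans
--
-- class UnionFind:
--     def __init__(self):
--         self.id = {}
--         self.size = {}
--         self.componentCount = 0
--
--     def add(self, x):
--         self.id[x] = x
--         self.size[x] = 1
--         self.componentCount += 1
--
--     def find(self, x):
--         while x != self.id[x]:
--             self.id[x] = self.id[self.id[x]]
--             x = self.id[x]
--         return x
--
--     def union(self, x, y):
--         x, y = self.find(x), self.find(y)
--         if x == y: return
--         if self.size[x] < self.size[y]:
--             x, y = y, x
--         # add the smaller component as subtree of the bigger component
--         self.id[y] = x
--         self.size[x] += self.size[y]
--         self.componentCount -= 1
-- ===== SOURCE B (Python) =====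
-- from typing import List
--
-- def numIslands2(m: int, n: int, positions: List[List[int]]) -> List[int]:
--     # Maintain an explicit list of disjoint components (lists of cells).
--     # A new cell merges every component adjacent to it; a repeated cell
--     # leaves everything unchanged.  No union-find structure at all.
--     comps = []
--     ans = []
--     for r, c in positions:
--         if any((r, c) in comp for comp in comps):
--             ans.append(len(comps))
--             continue
--         adj = [(r - 1, c), (r + 1, c), (r, c - 1), (r, c + 1)]
--         merged = [(r, c)]
--         rest = []
--         for comp in comps:
--             if any(a in comp for a in adj):
--                 merged += comp
--             else:
--                 rest.append(comp)
--         comps = rest + [merged]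
--         ans.append(len(comps))
--     return ans
-- ===== Notes on version B (the rewrite author's own statement) =====
-- stated objective: simpler
-- what changed: B drops the UnionFind class (parent/size dicts, path-halving find, union by size) and instead keeps a plain list of disjoint components, merging every component adjacent to a newly added cell into one; the count is just the length of that list.
import Mathlib
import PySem

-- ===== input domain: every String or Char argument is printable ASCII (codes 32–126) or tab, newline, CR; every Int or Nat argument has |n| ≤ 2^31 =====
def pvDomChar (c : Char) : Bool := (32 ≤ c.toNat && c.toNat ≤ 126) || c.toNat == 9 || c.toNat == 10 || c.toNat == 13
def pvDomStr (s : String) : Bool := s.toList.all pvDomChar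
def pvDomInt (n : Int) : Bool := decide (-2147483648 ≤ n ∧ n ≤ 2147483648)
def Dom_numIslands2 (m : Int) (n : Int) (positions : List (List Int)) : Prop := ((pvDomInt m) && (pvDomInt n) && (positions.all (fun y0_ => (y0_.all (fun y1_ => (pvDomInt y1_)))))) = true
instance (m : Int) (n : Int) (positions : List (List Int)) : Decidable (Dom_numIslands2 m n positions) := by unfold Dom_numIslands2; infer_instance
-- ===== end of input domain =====

-- B replaces the union-find structure by a plain list of disjoint components that are
-- merged wholesale when a new cell touches them (objective: simpler; return value only,
-- neither program mutates its arguments).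

-- ===== PORT A =====
-- Python's  UnionFind.find  (while loop with path halving), fuelled: the fuel
-- (number of stored keys + 1, passed at each call site) is proved sufficient on every
-- admitted input, so the port computes exactly what the Python loop computes.
def ufFind : Nat → PySem.Dict (Int × Int) (Int × Int) → (Int × Int) → PySem.Dict (Int × Int) (Int × Int) × (Int × Int)
  | 0, d, x => (d, x)
  | Nat.succ fuel, d, x =>
    match d.get? x with
    | none => (d, x)   -- Python would raise KeyError; find is only ever called on stored keys
    | some p =>
      if p = x then (d, x)
      else
        let gp := (d.get? p).getD p    -- self.id[self.id[x]]; the key is always present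
        ufFind fuel (d.insert x gp) gp

structure UF where
  id : PySem.Dict (Int × Int) (Int × Int)
  sz : PySem.Dict (Int × Int) Int
  cc : Int

def ufAdd (u : UF) (x : Int × Int) : UF := ⟨u.id.insert x x, u.sz.insert x 1, u.cc + 1⟩

def ufUnion (u : UF) (x y : Int × Int) : UF :=
  let fx := ufFind (u.id.size + 1) u.id x
  let fy := ufFind (fx.1.size + 1) fx.1 y
  let rx := fx.2
  let ry := fy.2
  if rx = ry then { u with id := fy.1 }
  else
    let sx := (u.sz.get? rx).getD 0    -- self.size[x]; the key is always present
    let sy := (u.sz.get? ry).getD 0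
    let ab := if sx < sy then (ry, rx) else (rx, ry)
    { id := fy.1.insert ab.2 ab.1,
      sz := u.sz.insert ab.1 ((u.sz.get? ab.1).getD 0 + (u.sz.get? ab.2).getD 0),
      cc := u.cc - 1 }

def aStep (acc : List Int × UF) (pos : List Int) : List Int × UF :=
  match pos with
  | [r, c] =>
    let u := acc.2
    if u.id.contains (r, c) then (acc.1 ++ [u.cc], u)
    else
      let u1 := ufAdd u (r, c)
      let neighs := [(r-1, c), (r+1, c), (r, c-1), (r, c+1)]
      let u2 := neighs.foldl (fun w nb => if w.id.contains nb then ufUnion w nb (r, c) else w) u1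
      (acc.1 ++ [u2.cc], u2)
  | _ => acc   -- a row without exactly two entries makes Python's 'for r, c in positions' raise; excluded by Pre_

def numIslands2 (m : Int) (n : Int) (positions : List (List Int)) : List Int :=
  (positions.foldl aStep ([], ⟨PySem.Dict.empty, PySem.Dict.empty, 0⟩)).1

-- ===== PORT B =====
def bStep (acc : List Int × List (List (Int × Int))) (pos : List Int) : List Int × List (List (Int × Int)) :=
  match pos with
  | [r, c] =>
    let comps := acc.2
    if comps.any (fun comp => comp.contains (r, c)) then (acc.1 ++ [(comps.length : Int)], comps)
    else
      let adj := [(r-1, c), (r+1, c), (r, c-1), (r, c+1)]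
      let mr := comps.foldl
        (fun mr comp => if adj.any (fun a => comp.contains a) then (mr.1 ++ comp, mr.2) else (mr.1, mr.2 ++ [comp]))
        ([(r, c)], [])
      let comps' := mr.2 ++ [mr.1]
      (acc.1 ++ [(comps'.length : Int)], comps')
  | _ => acc   -- same raising rows excluded by Pre_

def numIslands2_alt (m : Int) (n : Int) (positions : List (List Int)) : List Int :=
  (positions.foldl bStep ([], [])).1

-- ===== PRECONDITION & SPEC =====
-- Pre_ excludes exactly the inputs on which Python A raises (ValueError: a row of
-- positions that does not have exactly two entries cannot be unpacked by 'for r, c in positions').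
def Pre_numIslands2 (m : Int) (n : Int) (positions : List (List Int)) : Prop :=
  ∀ p ∈ positions, p.length = 2
instance (m : Int) (n : Int) (positions : List (List Int)) : Decidable (Pre_numIslands2 m n positions) := by
  unfold Pre_numIslands2; infer_instance

def pvWitness_numIslands2 : Int × Int × List (List Int) := (3, 3, [[0, 0], [0, 1], [2, 2], [1, 1]])

def Spec_numIslands2 (m : Int) (n : Int) (positions : List (List Int)) (out : List Int) : Prop := out = numIslands2_alt m n positions
instance (m : Int) (n : Int) (positions : List (List Int)) (out : List Int) : Decidable (Spec_numIslands2 m n positions out) := by unfold Spec_numIslands2; infer_instance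

-- ===== CLAIM (what is proved, stated in full; the proofs are below) =====
def Claim_equal_numIslands2 : Prop := ∀ (m : Int) (n : Int) (positions : List (List Int)), Dom_numIslands2 m n positions → Pre_numIslands2 m n positions → Spec_numIslands2 m n positions (numIslands2 m n positions)

-- ===== LEMMAS AND PROOFS =====

-- x and y lie in a common component of C
def covered (C : List (List (Int × Int))) (x : Int × Int) : Prop := ∃ c ∈ C, x ∈ c
def together (C : List (List (Int × Int))) (x y : Int × Int) : Prop := ∃ c ∈ C, x ∈ c ∧ y ∈ c
def DisjC (C : List (List (Int × Int))) : Prop := List.Pairwise (fun c1 c2 => ∀ a, a ∈ c1 → a ∉ c2) C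
def NEC (C : List (List (Int × Int))) : Prop := ∀ c ∈ C, c ≠ []

-- the union-find forest invariant: rt names each key's root, h strictly decreases along parent links
structure UFInv (d : PySem.Dict (Int × Int) (Int × Int)) (rt : Int × Int → Int × Int) (h : Int × Int → Nat) : Prop where
  closed : ∀ x p, d.get? x = some p → (d.get? p).isSome
  root_fix : ∀ x, (d.get? x).isSome → d.get? (rt x) = some (rt x)
  parent_rt : ∀ x p, d.get? x = some p → rt p = rt x
  root_rt : ∀ x, d.get? x = some x → rt x = x
  dec : ∀ x p, d.get? x = some p → p ≠ x → h p < h x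

-- the A-state partition is exactly B's component list
structure LinkInv (d : PySem.Dict (Int × Int) (Int × Int)) (cc : Int) (rt : Int × Int → Int × Int)
    (C : List (List (Int × Int))) : Prop where
  cov : ∀ x, (d.get? x).isSome ↔ covered C x
  part : ∀ x y, (d.get? x).isSome → (d.get? y).isSome → (rt x = rt y ↔ together C x y)
  disj : DisjC C
  ne : NEC C
  count : cc = (C.length : Int)

def StInv (u : UF) (C : List (List (Int × Int))) : Prop :=
  ∃ rt h, UFInv u.id rt h ∧ LinkInv u.id u.cc rt C

-- component list after the classes touched by the processed neighbours P have been merged with z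
def ms (comps : List (List (Int × Int))) (z : Int × Int) (P : List (Int × Int)) : List (List (Int × Int)) :=
  comps.filter (fun c => !(P.any (fun a => c.contains a))) ++
    [z :: (comps.filter (fun c => P.any (fun a => c.contains a))).flatten]

-- ---- generic list lemmas ----
lemma length_filter_lt {α : Type} {l : List α} {p q : α → Bool}
    (himp : ∀ a ∈ l, p a = true → q a = true) {a : α} (ha : a ∈ l)
    (hqa : q a = true) (hpa : p a = false) :
    (l.filter p).length < (l.filter q).length := by
  rw [← List.countP_eq_length_filter, ← List.countP_eq_length_filter]
  induction l with
  | nil => simp at ha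
  | cons b t ih =>
    have hmono : t.countP p ≤ t.countP q :=
      List.countP_mono_left (fun x hx => himp x (List.mem_cons_of_mem _ hx))
    rw [List.countP_cons, List.countP_cons]
    rcases List.mem_cons.1 ha with rfl | hat
    · simp [hpa, hqa]; omega
    · have h2 := ih (fun x hx => himp x (List.mem_cons_of_mem _ hx)) hat
      cases hpb : p b
      · cases hqb : q b <;> simp [hpb, hqb] <;> omega
      · have hqb := himp b (List.mem_cons_self) hpb
        simp [hpb, hqb]; omega

lemma countP_and_split {α : Type} (l : List α) (p r : α → Bool) :
    l.countP p = l.countP (fun a => p a && r a) + l.countP (fun a => p a && !r a) := by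
  induction l with
  | nil => simp
  | cons b t ih =>
    simp only [List.countP_cons]
    by_cases hp : p b = true <;> by_cases hr : r b = true <;> simp [hp, hr] <;> omega

lemma mem_class_unique {C : List (List (Int × Int))} (hd : DisjC C) {c₀ : List (Int × Int)}
    (h0 : c₀ ∈ C) {nb : Int × Int} (hnb : nb ∈ c₀) : ∀ c ∈ C, nb ∈ c → c = c₀ := by
  induction C with
  | nil => simp at h0
  | cons b t ih =>
    rw [DisjC, List.pairwise_cons] at hd
    obtain ⟨hdis, hT⟩ := hd
    intro c hc hnbc
    rcases List.mem_cons.1 h0 with rfl | h0t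
    · rcases List.mem_cons.1 hc with rfl | hct
      · rfl
      · exact absurd hnbc (hdis c hct nb hnb)
    · rcases List.mem_cons.1 hc with rfl | hct
      · exact absurd hnb (hdis c₀ h0t nb hnbc)
      · exact ih hT h0t c hct hnbc

lemma countP_contains_eq_one {C : List (List (Int × Int))} (hd : DisjC C) {c₀ : List (Int × Int)}
    (h0 : c₀ ∈ C) {nb : Int × Int} (hnb : nb ∈ c₀) :
    C.countP (fun c => c.contains nb) = 1 := by
  induction C with
  | nil => simp at h0
  | cons b t ih =>
    rw [DisjC, List.pairwise_cons] at hd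
    obtain ⟨hdis, hT⟩ := hd
    rw [List.countP_cons]
    rcases List.mem_cons.1 h0 with rfl | h0t
    · have hb : c₀.contains nb = true := List.contains_iff_mem.2 hnb
      have ht0 : t.countP (fun c => c.contains nb) = 0 := by
        rw [List.countP_eq_zero]
        intro c hc
        simpa [List.contains_iff_mem] using hdis c hc nb hnb
      rw [ht0, hb]
      rfl
    · have hb : b.contains nb = false := by
        have := hdis c₀ h0t
        by_contra hcon
        simp only [Bool.not_eq_false, List.contains_iff_mem] at hcon
        exact this nb hcon hnb
      rw [ih hT h0t, hb]
      rfl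

-- ---- ms characterizations ----
lemma covered_ms {comps : List (List (Int × Int))} {z : Int × Int} {P : List (Int × Int)} {t : Int × Int} :
    covered (ms comps z P) t ↔ covered comps t ∨ t = z := by
  unfold covered ms
  constructor
  · rintro ⟨c, hc, htc⟩
    rcases List.mem_append.1 hc with hk | hm
    · exact Or.inl ⟨c, (List.mem_filter.1 hk).1, htc⟩
    · simp only [List.mem_singleton] at hm
      subst hm
      rcases List.mem_cons.1 htc with rfl | ht
      · exact Or.inr rfl
      · obtain ⟨c, hc, htc⟩ := List.mem_flatten.1 ht
        exact Or.inl ⟨c, (List.mem_filter.1 hc).1, htc⟩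
  · rintro (⟨c, hc, htc⟩ | rfl)
    · by_cases hq : (P.any fun a => c.contains a) = true
      · exact ⟨_, List.mem_append_right _ (List.mem_singleton.2 rfl),
          List.mem_cons_of_mem _ (List.mem_flatten.2 ⟨c, List.mem_filter.2 ⟨hc, hq⟩, htc⟩)⟩
      · rw [Bool.not_eq_true] at hq
        exact ⟨c, List.mem_append_left _ (List.mem_filter.2 ⟨hc, by rw [hq]; rfl⟩), htc⟩
    · exact ⟨_, List.mem_append_right _ (List.mem_singleton.2 rfl), List.mem_cons_self⟩

def inZ (comps : List (List (Int × Int))) (z : Int × Int) (P : List (Int × Int)) (t : Int × Int) : Prop :=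
  t = z ∨ ∃ c ∈ comps, (P.any (fun a => c.contains a)) = true ∧ t ∈ c

lemma together_ms {comps : List (List (Int × Int))} {z : Int × Int} {P : List (Int × Int)} {t y : Int × Int} :
    together (ms comps z P) t y ↔ together comps t y ∨ (inZ comps z P t ∧ inZ comps z P y) := by
  have hmz : ∀ w : Int × Int,
      w ∈ z :: (comps.filter (fun c => P.any (fun a => c.contains a))).flatten ↔ inZ comps z P w := by
    intro w
    unfold inZ
    constructor
    · rintro h
      rcases List.mem_cons.1 h with rfl | hf
      · exact Or.inl rfl
      · obtain ⟨c, hc, hwc⟩ := List.mem_flatten.1 hf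
        have := List.mem_filter.1 hc
        exact Or.inr ⟨c, this.1, this.2, hwc⟩
    · rintro (rfl | ⟨c, hc, hq, hwc⟩)
      · exact List.mem_cons_self
      · exact List.mem_cons_of_mem _ (List.mem_flatten.2 ⟨c, List.mem_filter.2 ⟨hc, hq⟩, hwc⟩)
  unfold together ms
  constructor
  · rintro ⟨c, hc, htc, hyc⟩
    rcases List.mem_append.1 hc with hk | hm
    · exact Or.inl ⟨c, (List.mem_filter.1 hk).1, htc, hyc⟩
    · simp only [List.mem_singleton] at hm
      subst hm
      exact Or.inr ⟨(hmz t).1 htc, (hmz y).1 hyc⟩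
  · rintro (⟨c, hc, htc, hyc⟩ | ⟨ht, hy⟩)
    · by_cases hq : (P.any fun a => c.contains a) = true
      · refine ⟨_, List.mem_append_right _ (List.mem_singleton.2 rfl), ?_, ?_⟩
        · exact (hmz t).2 (Or.inr ⟨c, hc, hq, htc⟩)
        · exact (hmz y).2 (Or.inr ⟨c, hc, hq, hyc⟩)
      · rw [Bool.not_eq_true] at hq
        exact ⟨c, List.mem_append_left _ (List.mem_filter.2 ⟨hc, by rw [hq]; rfl⟩), htc, hyc⟩
    · exact ⟨_, List.mem_append_right _ (List.mem_singleton.2 rfl), (hmz t).2 ht, (hmz y).2 hy⟩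

lemma disj_ms {comps : List (List (Int × Int))} {z : Int × Int} {P : List (Int × Int)}
    (hd : DisjC comps) (hz : ¬ covered comps z) : DisjC (ms comps z P) := by
  have hsym : Symmetric (fun c1 c2 : List (Int × Int) => ∀ a, a ∈ c1 → a ∉ c2) := by
    intro c1 c2 h a ha2 ha1
    exact h a ha1 ha2
  unfold ms DisjC
  rw [List.pairwise_append]
  refine ⟨List.Pairwise.sublist List.filter_sublist hd, by simp, ?_⟩
  intro c hc mz hmz a hac hamz
  simp only [List.mem_singleton] at hmz
  subst hmz
  have hck := List.mem_filter.1 hc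
  rcases List.mem_cons.1 hamz with rfl | hf
  · exact hz ⟨c, hck.1, hac⟩
  · obtain ⟨c', hc', hac'⟩ := List.mem_flatten.1 hf
    have hc'f := List.mem_filter.1 hc'
    have hne : c ≠ c' := by
      intro e
      rw [← e] at hc'f
      rw [hc'f.2] at hck
      simp at hck
    exact (List.Pairwise.forall hsym hd hck.1 hc'f.1 hne) a hac hac'

lemma ne_ms {comps : List (List (Int × Int))} {z : Int × Int} {P : List (Int × Int)}
    (hne : NEC comps) : NEC (ms comps z P) := by
  intro c hc
  rcases List.mem_append.1 hc with hk | hm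
  · exact hne c (List.mem_filter.1 hk).1
  · simp only [List.mem_singleton] at hm
    subst hm
    simp

-- ---- union-find lemmas ----
lemma keys_isSome {d d' : PySem.Dict (Int × Int) (Int × Int)} (hk : d'.keys = d.keys) (z : Int × Int) :
    (d'.get? z).isSome ↔ (d.get? z).isSome := by
  have h1 := PySem.Dict.get?_eq_none_iff_not_mem_keys d' z
  have h2 := PySem.Dict.get?_eq_none_iff_not_mem_keys d z
  rw [hk, ← h2] at h1
  cases hdz : d'.get? z <;> cases hz2 : d.get? z <;> simp_all

lemma size_eq_keys_length (d : PySem.Dict (Int × Int) (Int × Int)) : d.size = d.keys.length := by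
  simp [PySem.Dict.keys, PySem.Dict.size]

lemma isSome_mem_keys {d : PySem.Dict (Int × Int) (Int × Int)} {z : Int × Int}
    (hz : (d.get? z).isSome) : z ∈ d.keys := by
  by_contra hm
  rw [← PySem.Dict.get?_eq_none_iff_not_mem_keys] at hm
  rw [hm] at hz
  simp at hz

def mu (d : PySem.Dict (Int × Int) (Int × Int)) (h : Int × Int → Nat) (x : Int × Int) : Nat :=
  (d.keys.filter (fun y => decide (h y < h x))).length

lemma find_spec : ∀ (fuel : Nat) (d : PySem.Dict (Int × Int) (Int × Int))
    (rt : Int × Int → Int × Int) (h : Int × Int → Nat) (x : Int × Int),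
    UFInv d rt h → (d.get? x).isSome → mu d h x < fuel →
    ∃ d', ufFind fuel d x = (d', rt x) ∧ UFInv d' rt h ∧ d'.keys = d.keys := by
  intro fuel
  induction fuel with
  | zero => intro d rt h x _ _ hmu; omega
  | succ f ih =>
    intro d rt h x inv hx hmu
    obtain ⟨p, hp⟩ := Option.isSome_iff_exists.1 hx
    by_cases hpx : p = x
    · subst hpx
      refine ⟨d, ?_, inv, rfl⟩
      rw [inv.root_rt _ hp]
      simp [ufFind, hp]
    · obtain ⟨g, hg⟩ := Option.isSome_iff_exists.1 (inv.closed x p hp)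
      have hpxh : h p < h x := inv.dec x p hp hpx
      have hgp : h g ≤ h p := by
        by_cases hgg : g = p
        · subst hgg; exact le_refl _
        · exact le_of_lt (inv.dec p g hg hgg)
      have hgx : h g < h x := lt_of_le_of_lt hgp hpxh
      have hgxne : g ≠ x := fun e => by rw [e] at hgx; omega
      have hcont : d.contains x = true := by
        rw [PySem.Dict.contains_eq_isSome_get?, hp]; rfl
      have hkeys : (d.insert x g).keys = d.keys := PySem.Dict.keys_insert_of_contains d g hcont
      have hget : ∀ z, (d.insert x g).get? z = if z = x then some g else d.get? z :=
        fun z => PySem.Dict.get?_insert d x z g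
      have hxrt : ∀ z, (d.get? z).isSome → rt z ≠ x := by
        intro z hz e
        have hfix := inv.root_fix z hz
        rw [e, hp] at hfix
        exact hpx (by injection hfix)
      have hrtgx : rt g = rt x := by rw [inv.parent_rt p g hg, inv.parent_rt x p hp]
      have inv' : UFInv (d.insert x g) rt h := by
        constructor
        · intro z q hzq
          rw [hget z] at hzq
          rw [hget q]
          by_cases hzx : z = x
          · rw [if_pos hzx] at hzq
            injection hzq with e
            subst e
            rw [if_neg hgxne]
            exact inv.closed p g hg
          · rw [if_neg hzx] at hzq
            by_cases hqx : q = x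
            · rw [if_pos hqx]; simp
            · rw [if_neg hqx]; exact inv.closed z q hzq
        · intro z hz
          have hz' : (d.get? z).isSome := by
            rw [hget z] at hz
            by_cases hzx : z = x
            · subst hzx; exact hx
            · rwa [if_neg hzx] at hz
          rw [hget (rt z), if_neg (hxrt z hz')]
          exact inv.root_fix z hz'
        · intro z q hzq
          rw [hget z] at hzq
          by_cases hzx : z = x
          · rw [if_pos hzx] at hzq
            injection hzq with e
            subst e
            rw [hzx, hrtgx]
          · rw [if_neg hzx] at hzq; exact inv.parent_rt z q hzq
        · intro z hzz
          rw [hget z] at hzz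
          by_cases hzx : z = x
          · rw [if_pos hzx] at hzz
            injection hzz with e
            exact absurd (e.trans hzx) hgxne
          · rw [if_neg hzx] at hzz; exact inv.root_rt z hzz
        · intro z q hzq hqz
          rw [hget z] at hzq
          by_cases hzx : z = x
          · rw [if_pos hzx] at hzq
            injection hzq with e
            subst e
            rw [hzx]
            exact hgx
          · rw [if_neg hzx] at hzq; exact inv.dec z q hzq hqz
      have hg1 : ((d.insert x g).get? g).isSome := by
        rw [hget g, if_neg hgxne]
        exact inv.closed p g hg
      have hmug : mu (d.insert x g) h g < f := by
        have hsame : mu (d.insert x g) h g = mu d h g := by unfold mu; rw [hkeys]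
        have hmem : g ∈ d.keys := isSome_mem_keys (inv.closed p g hg)
        have hlt : mu d h g < mu d h x := by
          unfold mu
          refine length_filter_lt ?_ hmem ?_ ?_
          · intro a _ hpa
            simp only [decide_eq_true_eq] at hpa ⊢
            omega
          · simp only [decide_eq_true_eq]
            exact hgx
          · simp
        omega
      obtain ⟨d', he, hinv', hk'⟩ := ih (d.insert x g) rt h g inv' hg1 hmug
      refine ⟨d', ?_, hinv', by rw [hk', hkeys]⟩
      have hstep : ufFind (f + 1) d x = ufFind f (d.insert x g) g := by
        simp [ufFind, hp, hpx, hg]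
      rw [hstep, he, hrtgx]

lemma link_spec (d2 : PySem.Dict (Int × Int) (Int × Int)) (rt : Int × Int → Int × Int)
    (h : Int × Int → Nat) (inv2 : UFInv d2 rt h) (w l : Int × Int)
    (hwr : d2.get? w = some w) (hlr : d2.get? l = some l) (hwl : w ≠ l) :
    UFInv (d2.insert l w) (fun t => if rt t = l then w else rt t)
      (fun t => if rt t = l then h t + h w + 1 else h t) ∧ (d2.insert l w).keys = d2.keys := by
  have hrtw : rt w = w := inv2.root_rt w hwr
  have hrtl : rt l = l := inv2.root_rt l hlr
  have hget : ∀ z, (d2.insert l w).get? z = if z = l then some w else d2.get? z :=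
    fun z => PySem.Dict.get?_insert d2 l z w
  have hcont : d2.contains l = true := by
    rw [PySem.Dict.contains_eq_isSome_get?, hlr]; rfl
  refine ⟨?_, PySem.Dict.keys_insert_of_contains d2 w hcont⟩
  constructor
  · intro z q hzq
    rw [hget z] at hzq
    rw [hget q]
    by_cases hzl : z = l
    · rw [if_pos hzl] at hzq
      injection hzq with e
      subst e
      rw [if_neg hwl, hwr]
      rfl
    · rw [if_neg hzl] at hzq
      by_cases hql : q = l
      · rw [if_pos hql]; rfl
      · rw [if_neg hql]; exact inv2.closed z q hzq
  · intro z hz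
    have hz' : (d2.get? z).isSome := by
      rw [hget z] at hz
      by_cases hzl : z = l
      · subst hzl; rw [hlr]; rfl
      · rwa [if_neg hzl] at hz
    by_cases hc : rt z = l
    · dsimp only
      rw [hc, if_pos rfl, hget w, if_neg hwl]
      exact hwr
    · dsimp only
      rw [if_neg hc, hget (rt z), if_neg hc]
      exact inv2.root_fix z hz'
  · intro z q hzq
    rw [hget z] at hzq
    by_cases hzl : z = l
    · rw [if_pos hzl] at hzq
      injection hzq with e
      subst e
      subst hzl
      simp [hrtw, hrtl, hwl]
    · rw [if_neg hzl] at hzq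
      have := inv2.parent_rt z q hzq
      rw [this]
  · intro z hzz
    rw [hget z] at hzz
    by_cases hzl : z = l
    · rw [if_pos hzl] at hzz
      injection hzz with e
      exact absurd (e.trans hzl) hwl
    · rw [if_neg hzl] at hzz
      have := inv2.root_rt z hzz
      rw [this, if_neg hzl]
  · intro z q hzq hqz
    rw [hget z] at hzq
    by_cases hzl : z = l
    · rw [if_pos hzl] at hzq
      injection hzq with e
      subst e
      subst hzl
      rw [if_neg (by rw [hrtw]; exact hwl), if_pos hrtl]
      omega
    · rw [if_neg hzl] at hzq
      have he := inv2.parent_rt z q hzq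
      have hd := inv2.dec z q hzq hqz
      by_cases hc : rt z = l
      · rw [if_pos (he.trans hc), if_pos hc]; omega
      · rw [if_neg (fun e => hc (he ▸ e)), if_neg hc]; exact hd

lemma union_spec (u : UF) (x y : Int × Int) (rt : Int × Int → Int × Int) (h : Int × Int → Nat)
    (inv : UFInv u.id rt h) (hx : (u.id.get? x).isSome) (hy : (u.id.get? y).isSome) :
    (rt x = rt y → ∃ d', ufUnion u x y = ⟨d', u.sz, u.cc⟩ ∧ UFInv d' rt h ∧ d'.keys = u.id.keys)
    ∧ (rt x ≠ rt y → ∃ d' sz' w l h', ((w = rt x ∧ l = rt y) ∨ (w = rt y ∧ l = rt x)) ∧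
        ufUnion u x y = ⟨d', sz', u.cc - 1⟩ ∧
        UFInv d' (fun t => if rt t = l then w else rt t) h' ∧ d'.keys = u.id.keys) := by
  have hmux : mu u.id h x < u.id.size + 1 := by
    have hle : mu u.id h x ≤ u.id.keys.length := List.length_filter_le _ _
    rw [size_eq_keys_length]; omega
  obtain ⟨d1, e1, inv1, k1⟩ := find_spec (u.id.size + 1) u.id rt h x inv hx hmux
  have hy1 : (d1.get? y).isSome := (keys_isSome k1 y).2 hy
  have hmuy : mu d1 h y < d1.size + 1 := by
    have hle : mu d1 h y ≤ d1.keys.length := List.length_filter_le _ _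
    rw [size_eq_keys_length]; omega
  obtain ⟨d2, e2, inv2, k2⟩ := find_spec (d1.size + 1) d1 rt h y inv1 hy1 hmuy
  have k2' : d2.keys = u.id.keys := by rw [k2, k1]
  have hx2 : (d2.get? x).isSome := (keys_isSome k2' x).2 hx
  have hy2 : (d2.get? y).isSome := (keys_isSome k2' y).2 hy
  have hwr : d2.get? (rt x) = some (rt x) := inv2.root_fix x hx2
  have hlr : d2.get? (rt y) = some (rt y) := inv2.root_fix y hy2
  constructor
  · intro hreq
    refine ⟨d2, ?_, inv2, k2'⟩
    simp only [ufUnion, e1, e2]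
    rw [if_pos hreq]
  · intro hrne
    by_cases hss : (u.sz.get? (rt x)).getD 0 < (u.sz.get? (rt y)).getD 0
    · -- winner rt y, loser rt x
      obtain ⟨hinv', hk'⟩ := link_spec d2 rt h inv2 (rt y) (rt x) hlr hwr (Ne.symm hrne)
      refine ⟨d2.insert (rt x) (rt y),
        u.sz.insert (rt y) ((u.sz.get? (rt y)).getD 0 + (u.sz.get? (rt x)).getD 0), rt y, rt x,
        (fun t => if rt t = rt x then h t + h (rt y) + 1 else h t), Or.inr ⟨rfl, rfl⟩, ?_, hinv', by rw [hk', k2']⟩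
      simp only [ufUnion, e1, e2]
      rw [if_neg hrne, if_pos hss]
    · obtain ⟨hinv', hk'⟩ := link_spec d2 rt h inv2 (rt x) (rt y) hwr hlr hrne
      refine ⟨d2.insert (rt y) (rt x),
        u.sz.insert (rt x) ((u.sz.get? (rt x)).getD 0 + (u.sz.get? (rt y)).getD 0), rt x, rt y,
        (fun t => if rt t = rt y then h t + h (rt x) + 1 else h t), Or.inl ⟨rfl, rfl⟩, ?_, hinv', by rw [hk', k2']⟩
      simp only [ufUnion, e1, e2]
      rw [if_neg hrne, if_neg hss]

lemma add_spec (u : UF) (comps : List (List (Int × Int))) (z : Int × Int)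
    (hI : StInv u comps) (hz : ¬ (u.id.get? z).isSome) :
    StInv (ufAdd u z) (comps ++ [[z]]) := by
  obtain ⟨rt, h, inv, lk⟩ := hI
  have hzc : ¬ covered comps z := fun hc => hz ((lk.cov z).2 hc)
  have hcont : u.id.contains z = false := by
    rw [PySem.Dict.contains_eq_isSome_get?]
    simpa using hz
  have hget : ∀ t, (u.id.insert z z).get? t = if t = z then some z else u.id.get? t :=
    fun t => PySem.Dict.get?_insert u.id z t z
  have hrtz : ∀ t, (u.id.get? t).isSome → rt t ≠ z := by
    intro t ht e
    apply hz
    rw [← e]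
    exact Option.isSome_iff_exists.2 ⟨rt t, inv.root_fix t ht⟩
  have htz : ∀ t, (u.id.get? t).isSome → t ≠ z := by
    intro t ht e
    rw [e] at ht
    exact hz ht
  simp only [StInv, ufAdd]
  refine ⟨fun t => if t = z then z else rt t, h, ?_, ?_⟩
  · constructor
    · intro t q htq
      rw [hget t] at htq
      rw [hget q]
      by_cases ht : t = z
      · rw [if_pos ht] at htq
        injection htq with e
        subst e
        rw [if_pos rfl]
        rfl
      · rw [if_neg ht] at htq
        by_cases hq : q = z
        · rw [if_pos hq]; rfl
        · rw [if_neg hq]; exact inv.closed t q htq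
    · intro t ht
      by_cases htz' : t = z
      · try dsimp only
        rw [if_pos htz', hget, if_pos rfl]
      · try dsimp only
        have ht' : (u.id.get? t).isSome := by
          rw [hget t, if_neg htz'] at ht
          exact ht
        rw [if_neg htz', hget, if_neg (hrtz t ht')]
        exact inv.root_fix t ht'
    · intro t q htq
      rw [hget t] at htq
      by_cases ht : t = z
      · rw [if_pos ht] at htq
        injection htq with e
        subst e
        rw [ht]
      · rw [if_neg ht] at htq
        try dsimp only
        have hq' : (u.id.get? q).isSome := inv.closed t q htq
        rw [if_neg ht, if_neg (htz q hq'), inv.parent_rt t q htq]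
    · intro t htt
      rw [hget t] at htt
      by_cases ht : t = z
      · try dsimp only; rw [if_pos ht, ht]
      · rw [if_neg ht] at htt
        try dsimp only
        rw [if_neg ht]
        exact inv.root_rt t htt
    · intro t q htq hqt
      rw [hget t] at htq
      by_cases ht : t = z
      · rw [if_pos ht] at htq
        injection htq with e
        exact absurd e.symm (by rw [ht] at hqt; exact hqt)
      · rw [if_neg ht] at htq
        exact inv.dec t q htq hqt
  · constructor
    · intro t
      constructor
      · intro ht
        by_cases htz' : t = z
        · exact ⟨[z], by simp, by simp [htz']⟩
        · rw [hget t, if_neg htz'] at ht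
          obtain ⟨ccl, h1, h2⟩ := (lk.cov t).1 ht
          exact ⟨ccl, List.mem_append_left _ h1, h2⟩
      · rintro ⟨ccl, h1, h2⟩
        rcases List.mem_append.1 h1 with hm | hm
        · have := (lk.cov t).2 ⟨ccl, hm, h2⟩
          rw [hget t]
          by_cases htz' : t = z
          · rw [if_pos htz']; rfl
          · rw [if_neg htz']; exact this
        · simp only [List.mem_singleton] at hm
          subst hm
          simp only [List.mem_singleton] at h2
          subst h2
          rw [hget t, if_pos rfl]
          rfl
    · intro t y ht hy
      try dsimp only
      by_cases htz' : t = z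
      · by_cases hyz' : y = z
        · rw [if_pos htz', if_pos hyz']
          constructor
          · intro _
            refine ⟨[z], List.mem_append_right _ (by simp), ?_, ?_⟩
            · simp [htz']
            · simp [hyz']
          · intro _
            rfl
        · have hy' : (u.id.get? y).isSome := by rw [hget y, if_neg hyz'] at hy; exact hy
          rw [if_pos htz', if_neg hyz']
          constructor
          · intro e
            exact absurd e.symm (hrtz y hy')
          · rintro ⟨ccl, h1, h2, h3⟩
            rcases List.mem_append.1 h1 with hm | hm
            · rw [htz'] at h2
              exact absurd ⟨ccl, hm, h2⟩ hzc
            · simp only [List.mem_singleton] at hm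
              subst hm
              simp only [List.mem_singleton] at h3
              exact absurd h3 hyz'
      · have ht' : (u.id.get? t).isSome := by rw [hget t, if_neg htz'] at ht; exact ht
        by_cases hyz' : y = z
        · rw [if_neg htz', if_pos hyz']
          constructor
          · intro e
            exact absurd e (hrtz t ht')
          · rintro ⟨ccl, h1, h2, h3⟩
            rcases List.mem_append.1 h1 with hm | hm
            · rw [hyz'] at h3
              exact absurd ⟨ccl, hm, h3⟩ hzc
            · simp only [List.mem_singleton] at hm
              subst hm
              simp only [List.mem_singleton] at h2
              exact absurd h2 htz'
        · have hy' : (u.id.get? y).isSome := by rw [hget y, if_neg hyz'] at hy; exact hy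
          rw [if_neg htz', if_neg hyz']
          rw [lk.part t y ht' hy']
          constructor
          · rintro ⟨ccl, h1, h2, h3⟩
            exact ⟨ccl, List.mem_append_left _ h1, h2, h3⟩
          · rintro ⟨ccl, h1, h2, h3⟩
            rcases List.mem_append.1 h1 with hm | hm
            · exact ⟨ccl, hm, h2, h3⟩
            · simp only [List.mem_singleton] at hm
              subst hm
              simp only [List.mem_singleton] at h2
              exact absurd h2 htz'
    · unfold DisjC
      rw [List.pairwise_append]
      refine ⟨lk.disj, by simp, ?_⟩
      intro c1 hc1 c2 hc2 a ha1 ha2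
      simp only [List.mem_singleton] at hc2
      subst hc2
      simp only [List.mem_singleton] at ha2
      subst ha2
      exact hzc ⟨c1, hc1, ha1⟩
    · intro cl hcl
      rcases List.mem_append.1 hcl with hm | hm
      · exact lk.ne cl hm
      · simp only [List.mem_singleton] at hm
        subst hm
        simp
    · show u.cc + 1 = _
      rw [lk.count]
      simp only [List.length_append, List.length_cons, List.length_nil]
      push_cast
      omega

-- ---- the neighbour loop ----
lemma ms_snoc_eq (comps : List (List (Int × Int))) (z : Int × Int) (P : List (Int × Int)) (nb : Int × Int)
    (h : ∀ c ∈ comps, nb ∈ c → (P.any fun a => c.contains a) = true) :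
    ms comps z (P ++ [nb]) = ms comps z P := by
  have hpt : ∀ c ∈ comps, ((P ++ [nb]).any fun a => c.contains a) = (P.any fun a => c.contains a) := by
    intro c hcc
    rw [List.any_append]
    by_cases hm : nb ∈ c
    · rw [h c hcc hm]; simp
    · have h2 : ([nb].any fun a => c.contains a) = false := by
        simp [List.contains_eq_mem, hm]
      rw [h2, Bool.or_false]
  unfold ms
  have hf1 : comps.filter (fun c => !((P ++ [nb]).any fun a => c.contains a))
      = comps.filter (fun c => !(P.any fun a => c.contains a)) :=
    List.filter_congr (fun c hc => by rw [hpt c hc])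
  have hf2 : comps.filter (fun c => ((P ++ [nb]).any fun a => c.contains a))
      = comps.filter (fun c => (P.any fun a => c.contains a)) :=
    List.filter_congr (fun c hc => hpt c hc)
  rw [hf1, hf2]

lemma together_ms_snoc (comps : List (List (Int × Int))) (z : Int × Int)
    (hzc : ¬ covered comps z) (hd : DisjC comps) {P : List (Int × Int)} {nb : Int × Int}
    {c₀ : List (Int × Int)} (hc₀ : c₀ ∈ comps) (hnb₀ : nb ∈ c₀)
    (hq₀ : (P.any fun a => c₀.contains a) = false) (hnz : nb ≠ z) (t y : Int × Int) :
    together (ms comps z (P ++ [nb])) t y ↔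
      (together (ms comps z P) t y ∨
        ((together (ms comps z P) t nb ∨ together (ms comps z P) t z) ∧
         (together (ms comps z P) y nb ∨ together (ms comps z P) y z))) := by
  have hu := mem_class_unique hd hc₀ hnb₀
  have hinZP_nb : ¬ inZ comps z P nb := by
    rintro (rfl | ⟨c, hc, hq, hmem⟩)
    · exact hnz rfl
    · rw [hu c hc hmem, hq₀] at hq
      cases hq
  have hinZ_snoc : ∀ t', inZ comps z (P ++ [nb]) t' ↔ (inZ comps z P t' ∨ t' ∈ c₀) := by
    intro t'
    constructor
    · rintro (rfl | ⟨c, hc, hq, hmem⟩)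
      · exact Or.inl (Or.inl rfl)
      · rw [List.any_append, Bool.or_eq_true] at hq
        rcases hq with h1 | h1
        · exact Or.inl (Or.inr ⟨c, hc, h1, hmem⟩)
        · have hm : nb ∈ c := by simpa using h1
          rw [hu c hc hm] at hmem
          exact Or.inr hmem
    · rintro (hin | hmem)
      · rcases hin with rfl | ⟨c, hc, hq, hmem⟩
        · exact Or.inl rfl
        · exact Or.inr ⟨c, hc, by rw [List.any_append, hq]; rfl, hmem⟩
      · exact Or.inr ⟨c₀, hc₀, by rw [List.any_append]; simp [List.contains_eq_mem, hnb₀], hmem⟩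
  have htog_nb : ∀ t', together (ms comps z P) t' nb ↔ t' ∈ c₀ := by
    intro t'
    rw [together_ms]
    constructor
    · rintro (⟨c, hc, ht', hnb'⟩ | ⟨_, h2⟩)
      · rw [← hu c hc hnb']; exact ht'
      · exact absurd h2 hinZP_nb
    · intro ht'
      exact Or.inl ⟨c₀, hc₀, ht', hnb₀⟩
  have htog_z : ∀ t', together (ms comps z P) t' z ↔ inZ comps z P t' := by
    intro t'
    rw [together_ms]
    constructor
    · rintro (⟨c, hc, _, hz'⟩ | ⟨h1, _⟩)
      · exact absurd ⟨c, hc, hz'⟩ hzc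
      · exact h1
    · intro h1
      exact Or.inr ⟨h1, Or.inl rfl⟩
  rw [htog_nb t, htog_nb y, htog_z t, htog_z y, together_ms, together_ms,
      hinZ_snoc t, hinZ_snoc y]
  tauto

lemma len_ms_snoc {comps : List (List (Int × Int))} (z : Int × Int) (hd : DisjC comps)
    {P : List (Int × Int)} {nb : Int × Int} {c₀ : List (Int × Int)} (hc₀ : c₀ ∈ comps)
    (hnb₀ : nb ∈ c₀) (hq₀ : (P.any fun a => c₀.contains a) = false) :
    (ms comps z (P ++ [nb])).length + 1 = (ms comps z P).length := by
  unfold ms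
  simp only [List.length_append, List.length_cons, List.length_nil]
  rw [← List.countP_eq_length_filter, ← List.countP_eq_length_filter]
  have hpt : ∀ c ∈ comps,
      (!((P ++ [nb]).any fun a => c.contains a)) = ((!(P.any fun a => c.contains a)) && !(c.contains nb)) := by
    intro c hcc
    rw [List.any_append]
    simp
  have hcp : comps.countP (fun c => !((P ++ [nb]).any fun a => c.contains a))
      = comps.countP (fun c => (!(P.any fun a => c.contains a)) && !(c.contains nb)) :=
    List.countP_congr (fun c hc => by rw [hpt c hc])
  rw [hcp]
  have hsplit := countP_and_split comps (fun c => !(P.any fun a => c.contains a)) (fun c => c.contains nb)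
  have hone : comps.countP (fun c => (!(P.any fun a => c.contains a)) && c.contains nb) = 1 := by
    rw [← countP_contains_eq_one hd hc₀ hnb₀]
    apply List.countP_congr
    intro c hc
    by_cases hm : nb ∈ c
    · rw [mem_class_unique hd hc₀ hnb₀ c hc hm, hq₀]
      simp
    · have hcm : c.contains nb = false := by simp [List.contains_eq_mem, hm]
      rw [hcm]
      simp
  omega

lemma nb_step (comps : List (List (Int × Int))) (z : Int × Int)
    (hzc : ¬ covered comps z) (hd : DisjC comps) (hne : NEC comps)
    (P : List (Int × Int)) (nb : Int × Int) (hnz : nb ≠ z) (u : UF)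
    (hI : StInv u (ms comps z P)) :
    StInv (if u.id.contains nb then ufUnion u nb z else u) (ms comps z (P ++ [nb])) := by
  obtain ⟨rt, h, inv, lk⟩ := hI
  by_cases hc : (u.id.get? nb).isSome
  · rw [if_pos (by rw [PySem.Dict.contains_eq_isSome_get?]; exact hc)]
    have hzS : (u.id.get? z).isSome := (lk.cov z).2 (covered_ms.2 (Or.inr rfl))
    by_cases hr : rt nb = rt z
    · obtain ⟨d', e, inv', k'⟩ := (union_spec u nb z rt h inv hc hzS).1 hr
      have htog := (lk.part nb z hc hzS).1 hr
      have hinz : inZ comps z P nb := by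
        rcases together_ms.1 htog with h1 | ⟨h1, _⟩
        · obtain ⟨c, hcc, _, hzz⟩ := h1
          exact absurd ⟨c, hcc, hzz⟩ hzc
        · exact h1
      rcases hinz with e' | ⟨c₀, hc₀, hq₀, hnb₀⟩
      · exact absurd e' hnz
      have hms : ms comps z (P ++ [nb]) = ms comps z P := by
        apply ms_snoc_eq
        intro c hcc hm
        rw [mem_class_unique hd hc₀ hnb₀ c hcc hm]
        exact hq₀
      rw [hms, e]
      refine ⟨rt, h, inv', ?_⟩
      constructor
      · intro t
        rw [keys_isSome k' t]
        exact lk.cov t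
      · intro t y ht hy
        exact lk.part t y ((keys_isSome k' t).1 ht) ((keys_isSome k' y).1 hy)
      · exact lk.disj
      · exact lk.ne
      · exact lk.count
    · obtain ⟨d', sz', w, l, h', hwl, e, inv', k'⟩ := (union_spec u nb z rt h inv hc hzS).2 hr
      have hnt : ¬ together (ms comps z P) nb z := fun ht => hr ((lk.part nb z hc hzS).2 ht)
      have hcov : covered comps nb := by
        rcases covered_ms.1 ((lk.cov nb).1 hc) with h1 | h1
        · exact h1
        · exact absurd h1 hnz
      obtain ⟨c₀, hc₀, hnb₀⟩ := hcov
      have hq₀ : (P.any fun a => c₀.contains a) = false := by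
        by_contra hcon
        rw [Bool.not_eq_false] at hcon
        exact hnt (together_ms.2 (Or.inr ⟨Or.inr ⟨c₀, hc₀, hcon, hnb₀⟩, Or.inl rfl⟩))
      rw [e]
      refine ⟨fun t => if rt t = l then w else rt t, h', inv', ?_⟩
      have hL : ∀ t', (u.id.get? t').isSome →
          ((rt t' = l ∨ rt t' = w) ↔ (together (ms comps z P) t' nb ∨ together (ms comps z P) t' z)) := by
        intro t' ht'
        have h1 := lk.part t' nb ht' hc
        have h2 := lk.part t' z ht' hzS
        rcases hwl with ⟨hw, hl⟩ | ⟨hw, hl⟩ <;> rw [hw, hl] <;> tauto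
      constructor
      · intro t
        rw [keys_isSome k' t, covered_ms, ← covered_ms (P := P)]
        exact lk.cov t
      · intro t y ht hy
        have ht' := (keys_isSome k' t).1 ht
        have hy' := (keys_isSome k' y).1 hy
        rw [together_ms_snoc comps z hzc hd hc₀ hnb₀ hq₀ hnz t y,
            ← lk.part t y ht' hy', ← hL t ht', ← hL y hy']
        try dsimp only
        by_cases h1 : rt t = l
        · by_cases h2 : rt y = l
          · rw [if_pos h1, if_pos h2]
            constructor
            · intro _
              exact Or.inr ⟨Or.inl h1, Or.inl h2⟩
            · intro _
              rfl
          · rw [if_pos h1, if_neg h2]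
            constructor
            · intro e2
              exact Or.inr ⟨Or.inl h1, Or.inr e2.symm⟩
            · rintro (e2 | ⟨_, (e3 | e3)⟩)
              · exact absurd (e2.symm.trans h1) h2
              · exact absurd e3 h2
              · exact e3.symm
        · by_cases h2 : rt y = l
          · rw [if_neg h1, if_pos h2]
            constructor
            · intro e2
              exact Or.inr ⟨Or.inr e2, Or.inl h2⟩
            · rintro (e2 | ⟨(e3 | e3), _⟩)
              · exact absurd (e2.trans h2) h1
              · exact absurd e3 h1
              · exact e3
          · rw [if_neg h1, if_neg h2]
            constructor
            · intro e2
              exact Or.inl e2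
            · rintro (e2 | ⟨e3 | e3, e4 | e4⟩)
              · exact e2
              · exact absurd e3 h1
              · exact absurd e3 h1
              · exact absurd e4 h2
              · exact e3.trans e4.symm
      · exact disj_ms hd hzc
      · exact ne_ms hne
      · have hlen := len_ms_snoc z hd hc₀ hnb₀ hq₀
        have hcnt := lk.count
        show u.cc - 1 = _
        omega
  · have hcf : u.id.contains nb = false := by
      rw [PySem.Dict.contains_eq_isSome_get?]
      simpa using hc
    rw [if_neg (by rw [hcf]; simp)]
    have hnc : ¬ covered comps nb := fun hcv => hc ((lk.cov nb).2 (covered_ms.2 (Or.inl hcv)))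
    have hms : ms comps z (P ++ [nb]) = ms comps z P := by
      apply ms_snoc_eq
      intro c hcc hm
      exact absurd ⟨c, hcc, hm⟩ hnc
    rw [hms]
    exact ⟨rt, h, inv, lk⟩

lemma nbloop (comps : List (List (Int × Int))) (z : Int × Int)
    (hzc : ¬ covered comps z) (hd : DisjC comps) (hne : NEC comps) :
    ∀ (L P : List (Int × Int)), (∀ nb ∈ L, nb ≠ z) →
    ∀ u, StInv u (ms comps z P) →
    StInv (L.foldl (fun w nb => if w.id.contains nb then ufUnion w nb z else w) u) (ms comps z (P ++ L)) := by
  intro L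
  induction L with
  | nil =>
    intro P _ u hI
    simpa using hI
  | cons nb L' ih =>
    intro P hnbz u hI
    rw [List.foldl_cons]
    have hstep := nb_step comps z hzc hd hne P nb (hnbz nb List.mem_cons_self) u hI
    have happ := ih (P ++ [nb]) (fun q hq => hnbz q (List.mem_cons_of_mem _ hq)) _ hstep
    rw [List.append_assoc] at happ
    exact happ

-- ---- B's inner fold ----
lemma bfold (adj : List (Int × Int)) :
    ∀ (comps : List (List (Int × Int))) (m : List (Int × Int)) (r0 : List (List (Int × Int))),
    comps.foldl (fun mr comp => if adj.any (fun a => comp.contains a) then (mr.1 ++ comp, mr.2) else (mr.1, mr.2 ++ [comp])) (m, r0)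
      = (m ++ (comps.filter (fun c => adj.any (fun a => c.contains a))).flatten,
         r0 ++ comps.filter (fun c => !(adj.any (fun a => c.contains a)))) := by
  intro comps
  induction comps with
  | nil => intro m r0; simp
  | cons c t ih =>
    intro m r0
    cases hq : (adj.any fun a => c.contains a)
    all_goals
      simp only [List.contains_eq_mem] at hq ih ⊢
      simp [List.foldl_cons, List.filter_cons, hq, ih, List.append_assoc]

-- ---- the per-position step and the main loop ----
lemma aStep_split (A : List Int) (u : UF) (pos : List Int) :
    aStep (A, u) pos = (A ++ (aStep ([], u) pos).1, (aStep ([], u) pos).2) := by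
  rcases pos with _ | ⟨r, _ | ⟨c, _ | ⟨d, t⟩⟩⟩
  · simp [aStep]
  · simp [aStep]
  · simp only [aStep]; split <;> simp
  · simp [aStep]

lemma bStep_split (A : List Int) (C : List (List (Int × Int))) (pos : List Int) :
    bStep (A, C) pos = (A ++ (bStep ([], C) pos).1, (bStep ([], C) pos).2) := by
  rcases pos with _ | ⟨r, _ | ⟨c, _ | ⟨d, t⟩⟩⟩
  · simp [bStep]
  · simp [bStep]
  · simp only [bStep]; split <;> simp
  · simp [bStep]

lemma step_core (u : UF) (comps : List (List (Int × Int))) (r c : Int) (hI : StInv u comps) :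
    (aStep ([], u) [r, c]).1 = (bStep ([], comps) [r, c]).1 ∧
    StInv (aStep ([], u) [r, c]).2 (bStep ([], comps) [r, c]).2 := by
  obtain ⟨rt, h, inv, lk⟩ := hI
  by_cases hg : covered comps (r, c)
  · have hA : u.id.contains (r, c) = true := by
      rw [PySem.Dict.contains_eq_isSome_get?]
      exact (lk.cov _).2 hg
    have hB : comps.any (fun comp => comp.contains (r, c)) = true := by
      obtain ⟨cc, hc1, hc2⟩ := hg
      exact List.any_eq_true.2 ⟨cc, hc1, List.contains_iff_mem.2 hc2⟩
    refine ⟨?_, ?_⟩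
    · simp only [aStep, bStep, hA, hB, if_true]
      simp [lk.count]
    · simp only [aStep, bStep, hA, hB, if_true]
      exact ⟨rt, h, inv, lk⟩
  · have hA : u.id.contains (r, c) = false := by
      cases hh : u.id.contains (r, c)
      · rfl
      · rw [PySem.Dict.contains_eq_isSome_get?] at hh
        exact absurd ((lk.cov _).1 hh) hg
    have hB : comps.any (fun comp => comp.contains (r, c)) = false := by
      cases hh : comps.any (fun comp => comp.contains (r, c))
      · rfl
      · obtain ⟨cc, hc1, hc2⟩ := List.any_eq_true.1 hh
        exact absurd ⟨cc, hc1, List.contains_iff_mem.1 hc2⟩ hg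
    have hz : ¬ (u.id.get? (r, c)).isSome = true := fun hh => hg ((lk.cov _).1 hh)
    have hadd := add_spec u comps (r, c) ⟨rt, h, inv, lk⟩ hz
    have hms0 : ms comps (r, c) [] = comps ++ [[(r, c)]] := by
      unfold ms
      simp
    have hneq : ∀ nb ∈ [(r - 1, c), (r + 1, c), (r, c - 1), (r, c + 1)], nb ≠ (r, c) := by
      intro nb hnb
      simp only [List.mem_cons, List.not_mem_nil, or_false] at hnb
      rcases hnb with rfl | rfl | rfl | rfl <;> simp [Prod.ext_iff] <;> try omega
    have hloop := nbloop comps (r, c) hg lk.disj lk.ne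
      [(r - 1, c), (r + 1, c), (r, c - 1), (r, c + 1)] [] hneq (ufAdd u (r, c))
      (by rw [hms0]; exact hadd)
    rw [List.nil_append] at hloop
    obtain ⟨rt2, h2, inv2, lk2⟩ := hloop
    unfold ms at lk2
    have hbf := bfold [(r - 1, c), (r + 1, c), (r, c - 1), (r, c + 1)] comps [(r, c)] []
    refine ⟨?_, ?_⟩
    · simp only [aStep, bStep, hA, hB, Bool.false_eq_true, if_false, hbf]
      have hcnt := lk2.count
      simp only [List.nil_append, List.singleton_append] at hcnt ⊢
      rw [hcnt]
    · simp only [aStep, bStep, hA, hB, Bool.false_eq_true, if_false, hbf]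
      refine ⟨rt2, h2, ?_, ?_⟩
      · exact inv2
      · simp only [List.nil_append, List.singleton_append]
        exact lk2

lemma loop_spec : ∀ (ps : List (List Int)) (A : List Int) (u : UF) (comps : List (List (Int × Int))),
    StInv u comps → (∀ p ∈ ps, p.length = 2) →
    (ps.foldl aStep (A, u)).1 = (ps.foldl bStep (A, comps)).1 := by
  intro ps
  induction ps with
  | nil => intro A u comps _ _; rfl
  | cons p t ih =>
    intro A u comps hI hlen
    have hp2 := hlen p (List.mem_cons_self)
    obtain ⟨r, c, hrc⟩ : ∃ r c, p = [r, c] := by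
      rcases p with _ | ⟨r, _ | ⟨c, _ | ⟨d, t'⟩⟩⟩ <;> simp at hp2
      exact ⟨r, c, rfl⟩
    subst hrc
    obtain ⟨hout, hI'⟩ := step_core u comps r c hI
    simp only [List.foldl_cons]
    rw [aStep_split, bStep_split, hout]
    exact ih _ _ _ hI' (fun q hq => hlen q (List.mem_cons_of_mem _ hq))

-- ===== VERDICT (by name: the statement is the Claim_ definition above) =====
theorem numIslands2_spec : Claim_equal_numIslands2 := by
  intro m n positions _ hpre
  unfold Spec_numIslands2 numIslands2 numIslands2_alt
  apply loop_spec positions [] _ [] _ hpre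
  refine ⟨id, fun _ => 0, ?_, ?_⟩
  · constructor <;> intro x <;> simp [PySem.Dict.get?_empty]
  · refine ⟨?_, ?_, ?_, ?_, ?_⟩
    · intro x; simp [covered, PySem.Dict.get?_empty]
    · intro x y hx; simp [PySem.Dict.get?_empty] at hx
    · exact List.Pairwise.nil
    · intro c hc; simp at hc
    · rfl
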